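-- pv_equiv track=rewrite | github.com/navgurukul10-ai/message-telegram-automation | backend/fix_empty_job_types.py | classify_job_type
-- ===== SOURCE A (Python) =====
-- def classify_job_type(keywords, message_text):
--     """Classify job based on keywords and message text"""
--     keywords_lower = keywords.lower() if keywords else ''
--     message_lower = message_text.lower() if message_text else ''
--
--     # Tech keywords
--     tech_keywords = [
--         'developer', 'engineer', 'programming', 'software', 'python', 'java',
--         'javascript', 'react', 'node', 'devops', 'data scientist', 'ml',
--         'ai', 'machine learning', 'backend', 'frontend', 'fullstack',
--         'full-stack', 'automation', 'qa', 'testing', 'cloud', 'aws'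
--     ]
--
--     # Freelance keywords
--     freelance_keywords = ['freelance', 'contract', 'consultant', 'remote freelance']
--
--     # Check for tech
--     for keyword in tech_keywords:
--         if keyword in keywords_lower or keyword in message_lower:
--             # Check if it's also freelance
--             for fl_keyword in freelance_keywords:
--                 if fl_keyword in keywords_lower or fl_keyword in message_lower:
--                     return 'freelance_tech'
--             return 'tech'
--
--     # Check for freelance non-tech
--     for keyword in freelance_keywords:
--         if keyword in keywords_lower or keyword in message_lower:
--             return 'freelance'
--
--     # Default to non_tech
--     return 'non_tech'
-- ===== SOURCE B (Python) =====
-- def classify_job_type(keywords, message_text):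
--     """Classify job based on keywords and message text"""
--     keywords_lower = keywords.lower() if keywords else ''
--     message_lower = message_text.lower() if message_text else ''
--
--     # One merged keyword table, each keyword tagged with a category bit
--     # (1 = tech, 2 = freelance); a single pass accumulates a bitmask,
--     # which directly indexes the result table.
--     tagged_keywords = [(kw, 1) for kw in (
--         'developer', 'engineer', 'programming', 'software', 'python', 'java',
--         'javascript', 'react', 'node', 'devops', 'data scientist', 'ml',
--         'ai', 'machine learning', 'backend', 'frontend', 'fullstack',
--         'full-stack', 'automation', 'qa', 'testing', 'cloud', 'aws'
--     )] + [(kw, 2) for kw in (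
--         'freelance', 'contract', 'consultant', 'remote freelance'
--     )]
--
--     mask = 0
--     for kw, bit in tagged_keywords:
--         if kw in keywords_lower or kw in message_lower:
--             mask |= bit
--     return ('non_tech', 'tech', 'freelance', 'freelance_tech')[mask]
-- ===== Notes on version B (the rewrite author's own statement) =====
-- stated objective: alternative
-- what changed: Replaces A's nested early-return loops (a freelance re-scan inside the tech loop plus a trailing freelance loop) with a single pass over one merged tagged keyword table accumulating a category bitmask, the result being read off a 4-entry table indexed by the mask.
import Mathlib
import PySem

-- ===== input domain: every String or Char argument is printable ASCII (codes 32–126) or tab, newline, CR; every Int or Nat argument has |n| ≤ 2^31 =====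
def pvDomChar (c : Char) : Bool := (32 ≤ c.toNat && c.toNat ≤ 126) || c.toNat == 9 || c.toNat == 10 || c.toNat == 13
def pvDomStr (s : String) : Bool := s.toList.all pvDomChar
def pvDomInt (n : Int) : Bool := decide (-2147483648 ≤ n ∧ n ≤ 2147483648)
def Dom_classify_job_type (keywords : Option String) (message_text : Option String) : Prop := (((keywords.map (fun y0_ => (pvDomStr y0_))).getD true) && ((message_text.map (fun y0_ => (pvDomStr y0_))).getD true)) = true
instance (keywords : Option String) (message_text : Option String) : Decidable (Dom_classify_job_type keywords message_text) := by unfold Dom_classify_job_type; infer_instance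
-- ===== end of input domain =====

-- B replaces A's nested early-return loops with a single accumulator pass over one merged
-- tagged keyword table building a category bitmask, read off a 4-entry result table.

def pvTechKeywords : List String :=
  ["developer", "engineer", "programming", "software", "python", "java",
   "javascript", "react", "node", "devops", "data scientist", "ml",
   "ai", "machine learning", "backend", "frontend", "fullstack",
   "full-stack", "automation", "qa", "testing", "cloud", "aws"]

def pvFreelanceKeywords : List String :=
  ["freelance", "contract", "consultant", "remote freelance"]

-- `x.lower() if x else ''` : None and "" are falsy, otherwise lowercase
def pvLowerOrEmpty (x : Option String) : String :=
  match x with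
  | none => ""
  | some s => if s = "" then "" else PySem.Str.lower s

-- ===== PORT A =====
-- inner freelance loop of A: returns true iff it would `return 'freelance_tech'`
def pvAFlInner (kl ml : String) : List String → Bool
  | [] => false
  | f :: rest => if PySem.Str.isIn f kl || PySem.Str.isIn f ml then true else pvAFlInner kl ml rest

-- A's tech loop, with the freelance check nested at the first tech match (early return)
def pvATechLoop (kl ml : String) : List String → Option String
  | [] => none
  | kw :: rest =>
      if PySem.Str.isIn kw kl || PySem.Str.isIn kw ml then
        some (if pvAFlInner kl ml pvFreelanceKeywords then "freelance_tech" else "tech")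
      else pvATechLoop kl ml rest

-- A's trailing freelance loop (early return of 'freelance')
def pvAFlLoop (kl ml : String) : List String → Option String
  | [] => none
  | f :: rest => if PySem.Str.isIn f kl || PySem.Str.isIn f ml then some "freelance" else pvAFlLoop kl ml rest

def classify_job_type (keywords : Option String) (message_text : Option String) : String :=
  let kl := pvLowerOrEmpty keywords
  let ml := pvLowerOrEmpty message_text
  match pvATechLoop kl ml pvTechKeywords with
  | some r => r
  | none =>
      match pvAFlLoop kl ml pvFreelanceKeywords with
      | some r => r
      | none => "non_tech"

-- ===== PORT B =====
-- merged keyword table, each keyword tagged with its category bit (1 = tech, 2 = freelance)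
def pvTagged : List (String × Nat) :=
  pvTechKeywords.map (fun kw => (kw, 1)) ++ pvFreelanceKeywords.map (fun kw => (kw, 2))

def classify_job_type_alt (keywords : Option String) (message_text : Option String) : String :=
  let kl := pvLowerOrEmpty keywords
  let ml := pvLowerOrEmpty message_text
  let mask := pvTagged.foldl
    (fun m p => if PySem.Str.isIn p.1 kl || PySem.Str.isIn p.1 ml then m ||| p.2 else m) 0
  -- mask ∈ {0,1,2,3} always, so the index is in range; getD's default is unreachable
  ["non_tech", "tech", "freelance", "freelance_tech"].getD mask "non_tech"

-- ===== PRECONDITION & SPEC =====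
def Spec_classify_job_type (keywords : Option String) (message_text : Option String) (out : String) : Prop := out = classify_job_type_alt keywords message_text
instance (keywords : Option String) (message_text : Option String) (out : String) : Decidable (Spec_classify_job_type keywords message_text out) := by unfold Spec_classify_job_type; infer_instance

-- ===== CLAIM (what is proved, stated in full; the proofs are below) =====
def Claim_equal_classify_job_type : Prop := ∀ (keywords : Option String) (message_text : Option String), Dom_classify_job_type keywords message_text → Spec_classify_job_type keywords message_text (classify_job_type keywords message_text)

-- ===== LEMMAS AND PROOFS =====
theorem pvAFlInner_eq_any (kl ml : String) (l : List String) :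
    pvAFlInner kl ml l = l.any (fun f => PySem.Str.isIn f kl || PySem.Str.isIn f ml) := by
  induction l with
  | nil => rfl
  | cons f rest ih => cases h : (PySem.Str.isIn f kl || PySem.Str.isIn f ml) <;> simp only [pvAFlInner, List.any_cons, ih, h, if_true, Bool.true_or, Bool.false_or] <;> rfl

theorem pvAFlLoop_eq (kl ml : String) (l : List String) :
    pvAFlLoop kl ml l =
      (if l.any (fun f => PySem.Str.isIn f kl || PySem.Str.isIn f ml) then some "freelance" else none) := by
  induction l with
  | nil => rfl
  | cons f rest ih => cases h : (PySem.Str.isIn f kl || PySem.Str.isIn f ml) <;> simp only [pvAFlLoop, List.any_cons, ih, h, if_true, Bool.true_or, Bool.false_or] <;> rfl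

theorem pvATechLoop_eq (kl ml : String) (l : List String) :
    pvATechLoop kl ml l =
      (if l.any (fun kw => PySem.Str.isIn kw kl || PySem.Str.isIn kw ml) then
        some (if pvAFlInner kl ml pvFreelanceKeywords then "freelance_tech" else "tech")
       else none) := by
  induction l with
  | nil => rfl
  | cons kw rest ih => cases h : (PySem.Str.isIn kw kl || PySem.Str.isIn kw ml) <;> simp only [pvATechLoop, List.any_cons, ih, h, if_true, Bool.true_or, Bool.false_or] <;> rfl

-- the fold over one tagged segment (all tagged with the same bit b) from any start m
theorem pvFold_seg (kl ml : String) (l : List String) (b : Nat) (m : Nat) :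
    (l.map (fun kw => (kw, b))).foldl
        (fun m p => if PySem.Str.isIn p.1 kl || PySem.Str.isIn p.1 ml then m ||| p.2 else m) m
      = (if l.any (fun kw => PySem.Str.isIn kw kl || PySem.Str.isIn kw ml) then m ||| b else m) := by
  induction l generalizing m with
  | nil => rfl
  | cons kw rest ih =>
      cases h : (PySem.Str.isIn kw kl || PySem.Str.isIn kw ml)
      · simp only [List.map_cons, List.foldl_cons, h, List.any_cons, Bool.false_or, ih]
        simp only [Bool.false_eq_true, if_false]
      · simp only [List.map_cons, List.foldl_cons, h, List.any_cons, Bool.true_or, ih]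
        simp only [if_true]
        split_ifs <;> simp [Nat.or_assoc, Nat.or_self]

-- ===== VERDICT (by name: the statement is the Claim_ definition above) =====
theorem classify_job_type_spec : Claim_equal_classify_job_type := by
  intro keywords message_text _
  unfold Spec_classify_job_type classify_job_type classify_job_type_alt
  simp only [pvTagged, List.foldl_append, pvFold_seg, pvATechLoop_eq, pvAFlLoop_eq, pvAFlInner_eq_any]
  split_ifs <;> simp_all
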